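-- pv_equiv track=rewrite | github.com/xbx18502/hpc_library_build_notes | random/future/python.py | solve
-- ===== SOURCE A (Python) =====
-- def solve(S):
--     n = len(S)
--     max_flip = 0
--
--     # 裏返せるコマの数を計算する
--     def count_flips(board, pos, color):
--         count = 0
--         # oppsiteは相手のコマの色
--         opposite = 'W' if color == 'B' else 'B'
--
--         # 左側で裏返せるコマをチェックする
--         temp_count = 0
--         has_left_anchor = False
--         for i in range(pos-1, -1, -1):
--             if board[i] == '.':
--                 break
--             if board[i] == opposite:
--                 temp_count += 1
--             if board[i] == color:
--                 has_left_anchor = True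
--                 count += temp_count
--                 break
--
--         # 右側で裏返せるコマをチェックする
--         temp_count = 0
--         has_right_anchor = False
--         for i in range(pos+1, n):
--             if board[i] == '.':
--                 break
--             if board[i] == opposite:
--                 temp_count += 1
--             if board[i] == color:
--                 has_right_anchor = True
--                 count += temp_count
--                 break
--
--         # 少なくとも片側にアンカーがあり、裏返せるコマがある場合、その数を返す
--         if (has_left_anchor or has_right_anchor) and count > 0:
--             return count
--         return 0
--
--     # すべての空きマスを探索する
--     for i in range(n):
--         if S[i] == '.':
--             # 白コマを置いてみる
--             flips_white = count_flips(S, i, 'W')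
--             max_flip = max(max_flip, flips_white)
--
--             # 黒コマを置いてみる
--             flips_black = count_flips(S, i, 'B')
--             max_flip = max(max_flip, flips_black)
--
--     return max_flip
-- ===== SOURCE B (Python) =====
-- def solve(S):
--     # One left-to-right pass records, per color, the flip count obtainable from
--     # the left at each cell; a right-to-left pass does the same for the right
--     # and combines at every '.' cell.
--     def upd(st, color, opp, ch):
--         # st = flips obtainable toward this side, or None if no anchor
--         if ch == '.':
--             return None
--         if ch == color:
--             return 0
--         if ch == opp:
--             return None if st is None else st + 1
--         return st
--
--     n = len(S)
--     lw = lb = None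
--     leftW = []
--     leftB = []
--     for ch in S:
--         leftW.append(0 if lw is None else lw)
--         leftB.append(0 if lb is None else lb)
--         lw = upd(lw, 'W', 'B', ch)
--         lb = upd(lb, 'B', 'W', ch)
--     rw = rb = None
--     best = 0
--     for i in range(n - 1, -1, -1):
--         ch = S[i]
--         if ch == '.':
--             best = max(best,
--                        leftW[i] + (0 if rw is None else rw),
--                        leftB[i] + (0 if rb is None else rb))
--         rw = upd(rw, 'W', 'B', ch)
--         rb = upd(rb, 'B', 'W', ch)
--     return best
-- ===== Notes on version B (the rewrite author's own statement) =====
-- stated objective: alternative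
-- what changed: Replaces A's per-empty-cell bidirectional rescans with two linear passes that maintain, per color, a running count of flips obtainable toward that side (or None when no anchor is reachable), recorded at each cell and combined at the empty cells; it trades A's repeated directional scans for per-character state updates.
import Mathlib
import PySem

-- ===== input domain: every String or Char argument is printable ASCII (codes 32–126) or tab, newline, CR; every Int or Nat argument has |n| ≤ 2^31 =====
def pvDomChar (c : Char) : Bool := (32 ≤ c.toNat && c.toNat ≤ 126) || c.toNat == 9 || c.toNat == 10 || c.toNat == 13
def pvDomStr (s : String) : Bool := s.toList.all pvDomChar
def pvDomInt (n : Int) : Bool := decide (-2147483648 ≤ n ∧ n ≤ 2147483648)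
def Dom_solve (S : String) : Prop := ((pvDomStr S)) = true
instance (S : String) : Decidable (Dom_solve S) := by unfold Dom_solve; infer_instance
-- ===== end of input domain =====

-- B is a two-pass DP (running per-color flip state) instead of A's per-empty-cell rescans; proved to return A's exact value.

-- ===== PORT A =====
-- A's inner directional loop 'for i in range(pos-1,-1,-1)/range(pos+1,n)' with break,
-- carrying temp_count; returns (count added at the anchor, anchor found).
-- Indices are always in range, so board[i] is board.getD i ' ' exactly.
def scanA (board : List Char) (color opp : Char) : List Nat → Nat → Nat × Bool
  | [], _ => (0, false)
  | i :: rest, temp =>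
    let c := board.getD i ' '
    if c = '.' then (0, false)
    else
      let temp' := if c = opp then temp + 1 else temp
      if c = color then (temp', true)
      else scanA board color opp rest temp'

def countFlipsA (board : List Char) (n : Nat) (pos : Nat) (color : Char) : Nat :=
  let opp := if color = 'B' then 'W' else 'B'
  let l := scanA board color opp ((List.range pos).reverse) 0
  let r := scanA board color opp (List.range' (pos + 1) (n - (pos + 1))) 0
  let count := l.1 + r.1
  if (l.2 || r.2) && decide (0 < count) then count else 0

def solve (S : String) : Int :=
  let L := S.toList
  let n := L.length
  ((List.range n).foldl (fun mx i =>
    if L.getD i ' ' = '.' then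
      max (max mx (countFlipsA L n i 'W')) (countFlipsA L n i 'B')
    else mx) 0 : Nat)

-- ===== PORT B =====
-- Source B's upd: per-color running state, None (= none) when no anchor is reachable.
def updB (st : Option Nat) (color opp c : Char) : Option Nat :=
  if c = '.' then none
  else if c = color then some 0
  else if c = opp then st.map (· + 1)
  else st

-- Source B's first loop: record the current left states at each cell, then update.
def leftPassB (cs : List Char) (lw lb : Option Nat) : List Nat × List Nat :=
  match cs with
  | [] => ([], [])
  | c :: rest =>
    let p := leftPassB rest (updB lw 'W' 'B' c) (updB lb 'B' 'W' c)
    ((lw.getD 0) :: p.1, (lb.getD 0) :: p.2)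

-- Source B's second loop 'for i in range(n-1,-1,-1)': walk the reversed lists.
def rightPassB : List Char → List Nat → List Nat → Option Nat → Option Nat → Nat → Nat
  | [], _, _, _, _, best => best
  | c :: cs, x :: xs, y :: ys, rw, rb, best =>
    let best' := if c = '.' then max (max best (x + rw.getD 0)) (y + rb.getD 0) else best
    rightPassB cs xs ys (updB rw 'W' 'B' c) (updB rb 'B' 'W' c) best'
  | _ :: _, _, _, _, _, best => best   -- unreachable: the lists always have equal length

def solve_alt (S : String) : Int :=
  let L := S.toList
  let p := leftPassB L none none
  ((rightPassB L.reverse p.1.reverse p.2.reverse none none 0 : Nat) : Int)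

-- ===== PRECONDITION & SPEC =====
def Spec_solve (S : String) (out : Int) : Prop := out = solve_alt S
instance (S : String) (out : Int) : Decidable (Spec_solve S out) := by unfold Spec_solve; infer_instance

-- ===== CLAIM (what is proved, stated in full; the proofs are below) =====
def Claim_equal_solve : Prop := ∀ (S : String), Dom_solve S → Spec_solve S (solve S)

-- ===== LEMMAS AND PROOFS =====

-- Common spec of a directional scan: flips obtainable scanning this char list
-- (nearest cell first), none when no anchor before a '.' / the end.
def dflip (color opp : Char) : List Char → Option Nat
  | [] => none
  | c :: cs =>
    if c = '.' then none
    else if c = color then some 0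
    else if c = opp then (dflip color opp cs).map (· + 1)
    else dflip color opp cs

lemma updB_dflip (color opp c : Char) (cs : List Char) :
    updB (dflip color opp cs) color opp c = dflip color opp (c :: cs) := by
  simp only [updB, dflip]

lemma scanA_eq (board : List Char) (color opp : Char) (hco : color ≠ opp) :
    ∀ (idxs : List Nat) (temp : Nat),
      scanA board color opp idxs temp =
        (match dflip color opp (idxs.map (fun i => board.getD i ' ')) with
         | some k => (temp + k, true)
         | none => (0, false)) := by
  intro idxs
  induction idxs with
  | nil => intro temp; simp [scanA, dflip]
  | cons i rest ih =>
    intro temp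
    simp only [List.getD] at ih ⊢
    simp only [scanA, dflip, List.map_cons, List.getD]
    by_cases hd : board[i]?.getD ' ' = '.'
    · simp [hd]
    · simp only [if_neg hd]
      by_cases hc : board[i]?.getD ' ' = color
      · have ho : ¬ board[i]?.getD ' ' = opp := fun h => hco (hc.symm.trans h)
        simp [if_pos hc, if_neg ho]
      · simp only [if_neg hc]
        by_cases ho : board[i]?.getD ' ' = opp
        · simp only [if_pos ho]
          rw [ih (temp + 1)]
          cases h : dflip color opp (rest.map (fun i => board[i]?.getD ' ')) with
          | none => simp
          | some k => simp; omega
        · simp only [if_neg ho]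
          exact ih temp

lemma map_range_rev_getD (L : List Char) (pos : Nat) (h : pos ≤ L.length) :
    ((List.range pos).reverse.map (fun i => L.getD i ' ')) = (L.take pos).reverse := by
  rw [List.map_reverse]
  congr 1
  induction pos with
  | zero => simp
  | succ k ih =>
    have hk : k < L.length := by omega
    rw [List.range_succ, List.map_append, ih (by omega), List.take_add_one]
    simp [List.getD, List.getElem?_eq_getElem hk]

lemma map_range'_getD (L : List Char) :
    ∀ (k a : Nat), a + k = L.length →
      (List.range' a k).map (fun i => L.getD i ' ') = L.drop a := by
  intro k
  induction k with
  | zero => intro a ha; simp; omega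
  | succ m ih =>
    intro a ha
    have hal : a < L.length := by omega
    rw [List.range'_succ, List.map_cons, ih (a + 1) (by omega),
        List.drop_eq_getElem_cons hal]
    simp [List.getD, List.getElem?_eq_getElem hal]

-- per-cell values: left part, and left+right total, for each color
def vW (L : List Char) (i : Nat) : Nat := (dflip 'W' 'B' ((L.take i).reverse)).getD 0
def vB (L : List Char) (i : Nat) : Nat := (dflip 'B' 'W' ((L.take i).reverse)).getD 0
def wW (L : List Char) (i : Nat) : Nat := vW L i + (dflip 'W' 'B' (L.drop (i + 1))).getD 0
def wB (L : List Char) (i : Nat) : Nat := vB L i + (dflip 'B' 'W' (L.drop (i + 1))).getD 0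

lemma countFlipsA_gen (L : List Char) (i : Nat) (hi : i < L.length)
    (color opp : Char) (hco : color ≠ opp) (hop : (if color = 'B' then 'W' else 'B') = opp) :
    countFlipsA L L.length i color =
      (dflip color opp ((L.take i).reverse)).getD 0 + (dflip color opp (L.drop (i + 1))).getD 0 := by
  simp only [countFlipsA, hop]
  rw [scanA_eq L color opp hco, scanA_eq L color opp hco,
      map_range_rev_getD L i (by omega)]
  by_cases hik : i + 1 ≤ L.length
  · rw [map_range'_getD L (L.length - (i + 1)) (i + 1) (by omega)]
    cases hl : dflip color opp ((L.take i).reverse) with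
    | none =>
      cases hr : dflip color opp (L.drop (i + 1)) with
      | none => simp
      | some k => simp; omega
    | some k =>
      cases hr : dflip color opp (L.drop (i + 1)) with
      | none => simp; omega
      | some m => simp; omega
  · omega

lemma countFlipsA_W (L : List Char) (i : Nat) (hi : i < L.length) :
    countFlipsA L L.length i 'W' = wW L i :=
  countFlipsA_gen L i hi 'W' 'B' (by decide) (by decide)

lemma countFlipsA_B (L : List Char) (i : Nat) (hi : i < L.length) :
    countFlipsA L L.length i 'B' = wB L i :=
  countFlipsA_gen L i hi 'B' 'W' (by decide) (by decide)

lemma leftPass_eq : ∀ (cs t : List Char),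
    leftPassB cs (dflip 'W' 'B' t) (dflip 'B' 'W' t) =
      ((List.range cs.length).map (fun i => (dflip 'W' 'B' (((cs.take i).reverse) ++ t)).getD 0),
       (List.range cs.length).map (fun i => (dflip 'B' 'W' (((cs.take i).reverse) ++ t)).getD 0)) := by
  intro cs
  induction cs with
  | nil => intro t; simp [leftPassB]
  | cons c rest ih =>
    intro t
    rw [leftPassB, updB_dflip, updB_dflip, ih (c :: t)]
    simp only [List.length_cons, List.range_succ_eq_map, List.map_cons, List.map_map]
    rw [Prod.mk.injEq]
    refine ⟨?_, ?_⟩ <;>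
    · simp [Function.comp_def, List.take_succ_cons]

lemma rightPass_eq (L : List Char) :
    ∀ (k : Nat), k ≤ L.length → ∀ (best : Nat),
      rightPassB ((L.take k).reverse)
        (((List.range k).map (vW L)).reverse) (((List.range k).map (vB L)).reverse)
        (dflip 'W' 'B' (L.drop k)) (dflip 'B' 'W' (L.drop k)) best
      = ((List.range k).reverse).foldl
          (fun mx i => if L.getD i ' ' = '.' then max (max mx (wW L i)) (wB L i) else mx) best := by
  intro k
  induction k with
  | zero => intro _ best; simp [rightPassB]
  | succ m ih =>
    intro hm best
    have hml : m < L.length := by omega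
    have htake : (L.take (m + 1)).reverse = L[m] :: (L.take m).reverse := by
      rw [List.take_add_one]; simp [List.getElem?_eq_getElem hml]
    have hmapW : (((List.range (m + 1)).map (vW L)).reverse) = vW L m :: ((List.range m).map (vW L)).reverse := by
      rw [List.range_succ]; simp
    have hmapB : (((List.range (m + 1)).map (vB L)).reverse) = vB L m :: ((List.range m).map (vB L)).reverse := by
      rw [List.range_succ]; simp
    rw [htake, hmapW, hmapB, rightPassB]
    have hdrop : L.drop m = L[m] :: L.drop (m + 1) := List.drop_eq_getElem_cons hml
    rw [show (List.range (m + 1)).reverse = m :: (List.range m).reverse by rw [List.range_succ]; simp]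
    rw [List.foldl_cons]
    rw [updB_dflip, updB_dflip, ← hdrop]
    rw [ih (by omega)]
    congr 1
    have hgd : L.getD m ' ' = L[m] := by simp [List.getD, List.getElem?_eq_getElem hml]
    simp only [hgd, wW, wB]

-- fold of max over the reversed index list equals the forward fold
lemma foldl_max_comm (u : Nat → Nat) :
    ∀ (l : List Nat) (a b : Nat),
      l.foldl (fun mx i => max mx (u i)) (max a b) = max a (l.foldl (fun mx i => max mx (u i)) b) := by
  intro l
  induction l with
  | nil => intro a b; rfl
  | cons x xs ih =>
    intro a b
    simp only [List.foldl_cons]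
    rw [show max (max a b) (u x) = max a (max b (u x)) by omega, ih]

lemma foldl_max_reverse (u : Nat → Nat) :
    ∀ (l : List Nat) (b : Nat),
      l.reverse.foldl (fun mx i => max mx (u i)) b = l.foldl (fun mx i => max mx (u i)) b := by
  intro l
  induction l with
  | nil => intro b; rfl
  | cons x xs ih =>
    intro b
    simp only [List.reverse_cons, List.foldl_append, List.foldl_cons, List.foldl_nil, ih]
    rw [Nat.max_comm b (u x)]
    have h := foldl_max_comm u xs (u x) b
    omega

lemma step_as_max (L : List Char) (mx i : Nat) :
    (if L.getD i ' ' = '.' then max (max mx (wW L i)) (wB L i) else mx)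
      = max mx (if L.getD i ' ' = '.' then max (wW L i) (wB L i) else 0) := by
  split_ifs <;> omega

-- ===== VERDICT (by name: the statement is the Claim_ definition above) =====
theorem solve_spec : Claim_equal_solve := by
  intro S _
  unfold Spec_solve
  simp only [solve, solve_alt]
  set L := S.toList with hL
  have hleft := leftPass_eq L []
  simp only [List.append_nil] at hleft
  rw [show (dflip 'W' 'B' ([] : List Char)) = none from rfl,
      show (dflip 'B' 'W' ([] : List Char)) = none from rfl] at hleft
  rw [hleft]
  dsimp only
  have hr := rightPass_eq L L.length (le_refl _) 0
  rw [List.take_length] at hr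
  rw [show (dflip 'W' 'B' (L.drop L.length)) = none by simp [dflip],
      show (dflip 'B' 'W' (L.drop L.length)) = none by simp [dflip]] at hr
  rw [show (fun i => (dflip 'W' 'B' (List.take i L).reverse).getD 0) = vW L from rfl,
      show (fun i => (dflip 'B' 'W' (List.take i L).reverse).getD 0) = vB L from rfl]
  rw [hr]
  congr 1
  have hcong : (List.range L.length).foldl (fun mx i =>
      if L.getD i ' ' = '.' then
        max (max mx (countFlipsA L L.length i 'W')) (countFlipsA L L.length i 'B')
      else mx) 0
      = (List.range L.length).foldl
          (fun mx i => if L.getD i ' ' = '.' then max (max mx (wW L i)) (wB L i) else mx) 0 := by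
    apply PySem.List.foldl_congr_mem
    intro mx i hi
    have hilt : i < L.length := List.mem_range.mp hi
    rw [countFlipsA_W L i hilt, countFlipsA_B L i hilt]
  rw [hcong]
  have hstep : (fun (mx i : Nat) => if L.getD i ' ' = '.' then max (max mx (wW L i)) (wB L i) else mx)
      = (fun mx i => max mx (if L.getD i ' ' = '.' then max (wW L i) (wB L i) else 0)) := by
    funext mx i; exact step_as_max L mx i
  rw [hstep, foldl_max_reverse]
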